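-- pv_equiv track=rewrite | github.com/dawin002/Algorithm | This_is_Codingtest/P30_bin_search_가사_검색.py | song_search_ans
-- ===== SOURCE A (Python) =====
-- def song_search_ans(words, queries):
--     from bisect import bisect_left, bisect_right
--
--     def count_by_range(arr, left, right):
--         left_idx = bisect_left(arr, left)
--         right_idx = bisect_right(arr, right)
--         return right_idx - left_idx
--
--     # 모든 단어를 길이마다 나누어 저장한 리스트
--     arr = [[] for _ in range(10001)]
--     # 모든 단어를 뒤집어서 길이마다 나누어 저장한 리스트
--     re_arr = [[] for _ in range(10001)]
--
--     answer = []
--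
--     # 모든 단어와 뒤집어진 단어 길이에 맞게 리스트에 저장
--     for word in words:
--         arr[len(word)].append(word)
--         re_arr[len(word)].append(word[::-1])
--
--     for i in range(10001):
--         arr[i].sort()
--         re_arr[i].sort()
--
--     for q in queries:
--         if q[0] != '?':
--             res = count_by_range(arr[len(q)], q.replace('?', 'a'), q.replace('?', 'z'))
--         else:
--             res = count_by_range(re_arr[len(q)], q[::-1].replace('?', 'a'), q[::-1].replace('?', 'z'))
--         answer.append(res)
--
--     return answer
-- ===== SOURCE B (Python) =====
-- def song_search_ans(words, queries):
--     # One direct counting pass over the words per query: no length buckets,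
--     # no sorting, no binary search.
--     def count(q):
--         n = len(q)
--         if not q.startswith('?'):
--             lo, hi = q.replace('?', 'a'), q.replace('?', 'z')
--             return sum(1 for w in words if len(w) == n and lo <= w <= hi)
--         r = q[::-1]
--         lo, hi = r.replace('?', 'a'), r.replace('?', 'z')
--         return sum(1 for w in words if len(w) == n and lo <= w[::-1] <= hi)
--     return [count(q) for q in queries]
-- ===== Notes on version B (the rewrite author's own statement) =====
-- stated objective: simpler
-- what changed: B drops A's 10001 length buckets, per-bucket sorting and binary searches entirely and instead answers each query by one direct linear count over the words (length equality plus lexicographic range test, on the reversed word for suffix queries).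
import Mathlib
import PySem

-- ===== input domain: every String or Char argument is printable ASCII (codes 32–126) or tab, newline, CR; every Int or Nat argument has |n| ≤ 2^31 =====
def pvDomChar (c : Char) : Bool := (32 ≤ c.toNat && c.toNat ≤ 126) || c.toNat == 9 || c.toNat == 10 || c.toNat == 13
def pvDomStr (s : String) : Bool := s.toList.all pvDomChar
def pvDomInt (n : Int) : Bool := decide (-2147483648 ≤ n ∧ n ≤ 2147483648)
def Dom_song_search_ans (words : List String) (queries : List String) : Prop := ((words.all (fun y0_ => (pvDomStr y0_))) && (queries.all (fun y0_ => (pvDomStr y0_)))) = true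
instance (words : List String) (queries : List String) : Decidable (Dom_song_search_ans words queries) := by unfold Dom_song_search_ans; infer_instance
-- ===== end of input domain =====

-- B replaces A's 10001 length buckets + per-bucket sort + binary searches by one direct
-- linear count over the words per query (objective: simpler; not claimed faster).

-- ===== PORT A =====
-- s[::-1]
def pvRev (s : String) : String := (PySem.Str.slice? s none none (-1)).getD ""

-- helper count_by_range: bisect_right - bisect_left
def pvCountByRange (arr : List String) (left : String) (right : String) : Int :=
  (PySem.List.bisectRight arr right : Int) - (PySem.List.bisectLeft arr left : Int)

def song_search_ans (words : List String) (queries : List String) : List Int :=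
  -- arr / re_arr: 10001 buckets, one fold filling both (the Python fills both in one loop)
  let init : List (List String) := List.replicate 10001 []
  let p := words.foldl (fun (p : List (List String) × List (List String)) w =>
      (p.1.modify (PySem.Str.len w).toNat (· ++ [w]),
       p.2.modify (PySem.Str.len w).toNat (· ++ [pvRev w]))) (init, init)
  -- for i in range(10001): arr[i].sort()  (sort each slot)
  let arr := p.1.map (fun b => PySem.List.sorted b (fun x => x) false)
  let reArr := p.2.map (fun b => PySem.List.sorted b (fun x => x) false)
  queries.foldl (fun answer q =>
    answer ++
      [if (PySem.Str.pyGet? q 0).getD '?' ≠ '?' then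
        pvCountByRange (PySem.List.pyGetD arr (PySem.Str.len q) [])
          (PySem.Str.replace q "?" "a") (PySem.Str.replace q "?" "z")
      else
        pvCountByRange (PySem.List.pyGetD reArr (PySem.Str.len q) [])
          (PySem.Str.replace (pvRev q) "?" "a") (PySem.Str.replace (pvRev q) "?" "z")]) []

-- ===== PORT B =====
def pvAltCount (words : List String) (q : String) : Int :=
  let n := PySem.Str.len q
  if !(PySem.Str.startswith q "?") then
    let lo := PySem.Str.replace q "?" "a"
    let hi := PySem.Str.replace q "?" "z"
    ((words.countP (fun w => PySem.Str.len w == n && decide (lo ≤ w) && decide (w ≤ hi)) : Nat) : Int)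
  else
    let r := pvRev q
    let lo := PySem.Str.replace r "?" "a"
    let hi := PySem.Str.replace r "?" "z"
    ((words.countP (fun w => PySem.Str.len w == n && decide (lo ≤ pvRev w) && decide (pvRev w ≤ hi)) : Nat) : Int)

def song_search_ans_alt (words : List String) (queries : List String) : List Int :=
  queries.map (pvAltCount words)

-- ===== PRECONDITION & SPEC =====
-- Pre_ excludes exactly the inputs on which A raises IndexError: an empty query (q[0])
-- or a word/query longer than 10000 characters (index past the 10001 buckets).
def Pre_song_search_ans (words : List String) (queries : List String) : Prop :=
  (∀ w ∈ words, w.toList.length ≤ 10000) ∧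
  (∀ q ∈ queries, q.toList.length ≠ 0 ∧ q.toList.length ≤ 10000)
instance (words : List String) (queries : List String) : Decidable (Pre_song_search_ans words queries) := by
  unfold Pre_song_search_ans; infer_instance

def pvWitness_song_search_ans : List String × List String :=
  (["abc", "abd", "xbc", "x"], ["ab?", "?bc", "???", "x"])

def Spec_song_search_ans (words : List String) (queries : List String) (out : List Int) : Prop := out = song_search_ans_alt words queries
instance (words : List String) (queries : List String) (out : List Int) : Decidable (Spec_song_search_ans words queries out) := by unfold Spec_song_search_ans; infer_instance

-- ===== CLAIM (what is proved, stated in full; the proofs are below) =====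
def Claim_equal_song_search_ans : Prop := ∀ (words : List String) (queries : List String), Dom_song_search_ans words queries → Pre_song_search_ans words queries → Spec_song_search_ans words queries (song_search_ans words queries)


-- ===== LEMMAS AND PROOFS =====

-- A's per-query computation, named for the proof.
def pvACount (words : List String) (q : String) : Int :=
  let init : List (List String) := List.replicate 10001 []
  let p := words.foldl (fun (p : List (List String) × List (List String)) w =>
      (p.1.modify (PySem.Str.len w).toNat (· ++ [w]),
       p.2.modify (PySem.Str.len w).toNat (· ++ [pvRev w]))) (init, init)
  let arr := p.1.map (fun b => PySem.List.sorted b (fun x => x) false)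
  let reArr := p.2.map (fun b => PySem.List.sorted b (fun x => x) false)
  if (PySem.Str.pyGet? q 0).getD '?' ≠ '?' then
    pvCountByRange (PySem.List.pyGetD arr (PySem.Str.len q) [])
      (PySem.Str.replace q "?" "a") (PySem.Str.replace q "?" "z")
  else
    pvCountByRange (PySem.List.pyGetD reArr (PySem.Str.len q) [])
      (PySem.Str.replace (pvRev q) "?" "a") (PySem.Str.replace (pvRev q) "?" "z")

theorem pvA_eq_map (words queries : List String) :
    song_search_ans words queries = queries.map (pvACount words) := by
  rw [show song_search_ans words queries
      = queries.foldl (fun answer q => answer ++ [pvACount words q]) [] from rfl,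
    PySem.List.foldl_append_singleton_eq_map]
  simp

-- single-character replace is a map
theorem pvGo_single (c d : Char) :
    ∀ (l : List Char) (fuel : Nat) (acc : List Char), l.length ≤ fuel →
      PySem.Chars.replace.go [c] [d] fuel l acc
        = acc.reverse ++ l.map (fun x => if x = c then d else x)
  | [], fuel, acc, _ => by cases fuel <;> simp [PySem.Chars.replace.go]
  | x :: t, 0, acc, h => by simp at h
  | x :: t, fuel + 1, acc, h => by
      have h' : t.length ≤ fuel := by simpa using h
      rw [show PySem.Chars.replace.go [c] [d] (fuel + 1) (x :: t) acc
          = (if [c].isPrefixOf (x :: t) = true then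
               PySem.Chars.replace.go [c] [d] fuel (List.drop [c].length (x :: t))
                 ([d].reverse ++ acc)
             else PySem.Chars.replace.go [c] [d] fuel t (x :: acc)) from rfl]
      by_cases hx : x = c
      · rw [if_pos (by subst hx; simp [List.isPrefixOf])]
        rw [pvGo_single c d (List.drop [c].length (x :: t)) fuel ([d].reverse ++ acc)
          (by simpa using h')]
        simp [hx]
      · rw [if_neg (by simp [List.isPrefixOf]; exact fun hh => hx hh.symm)]
        rw [pvGo_single c d t fuel (x :: acc) h']
        simp [hx]

theorem pvReplace_single (s : List Char) (c d : Char) :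
    PySem.Chars.replace s [c] [d] = s.map (fun x => if x = c then d else x) := by
  simp [PySem.Chars.replace, pvGo_single c d s s.length [] le_rfl]

theorem pvLexOrEq (f g : Char → Char) (h : ∀ x, f x ≤ g x) :
    ∀ l : List Char, List.Lex (· < ·) (l.map f) (l.map g) ∨ l.map f = l.map g
  | [] => Or.inr rfl
  | x :: t => by
      rcases lt_or_eq_of_le (h x) with hx | hx
      · exact Or.inl (List.Lex.rel hx)
      · rcases pvLexOrEq f g h t with ht | ht
        · exact Or.inl (by rw [List.map_cons, List.map_cons, hx]; exact List.Lex.cons ht)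
        · exact Or.inr (by rw [List.map_cons, List.map_cons, hx, ht])

theorem pvReplace_le (p : String) :
    PySem.Str.replace p "?" "a" ≤ PySem.Str.replace p "?" "z" := by
  rw [String.le_iff_toList_le, PySem.Str.toList_replace, PySem.Str.toList_replace]
  have h1 : ("?" : String).toList = ['?'] := rfl
  have h2 : ("a" : String).toList = ['a'] := rfl
  have h3 : ("z" : String).toList = ['z'] := rfl
  rw [h1, h2, h3, pvReplace_single, pvReplace_single]
  have hle : ∀ x : Char, (if x = '?' then 'a' else x) ≤ (if x = '?' then 'z' else x) := by
    intro x; by_cases hx : x = '?' <;> simp [hx]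
  rcases pvLexOrEq _ _ hle p.toList with hlt | heq
  · exact le_of_lt hlt
  · exact le_of_eq heq

-- countP of a predicate that is true exactly below index r
theorem pvCountP_of_split {α : Type} (p : α → Bool) :
    ∀ (xs : List α) (r : Nat), r ≤ xs.length →
      (∀ j (hj : j < xs.length), j < r → p xs[j] = true) →
      (∀ j (hj : j < xs.length), r ≤ j → p xs[j] = false) →
      xs.countP p = r
  | [], r, hr, _, _ => by simp only [List.length_nil, Nat.le_zero] at hr; simp [hr]
  | a :: t, 0, _, _, h2 => by
      rw [List.countP_eq_zero]
      intro b hb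
      obtain ⟨i, hi, rfl⟩ := List.mem_iff_getElem.mp hb
      simp [h2 i hi (Nat.zero_le i)]
  | a :: t, r + 1, hr, h1, h2 => by
      have ha : p a = true := h1 0 (by simp) (by omega)
      have ht : t.countP p = r :=
        pvCountP_of_split p t r (by simpa using hr)
          (fun j hj hjr => by simpa using h1 (j + 1) (by simpa using hj) (by omega))
          (fun j hj hjr => by simpa using h2 (j + 1) (by simpa using hj) (by omega))
      simp [List.countP_cons, ha, ht]

theorem pvBisectLeftLoop_spec {α : Type} [LinearOrder α] (xs : List α) (x : α)
    (hs : xs.Pairwise (· ≤ ·)) :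
    ∀ (fuel lo hi : Nat), lo ≤ hi → hi ≤ xs.length → hi - lo ≤ fuel →
      (∀ j (hj : j < xs.length), j < lo → xs[j] < x) →
      (∀ j (hj : j < xs.length), hi ≤ j → x ≤ xs[j]) →
      PySem.List.bisectLeftLoop xs x fuel lo hi ≤ xs.length ∧
      (∀ j (hj : j < xs.length), j < PySem.List.bisectLeftLoop xs x fuel lo hi → xs[j] < x) ∧
      (∀ j (hj : j < xs.length), PySem.List.bisectLeftLoop xs x fuel lo hi ≤ j → x ≤ xs[j]) := by
  intro fuel
  induction fuel with
  | zero =>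
      intro lo hi hlohi hhi hfuel hlow hhigh
      have : lo = hi := by omega
      subst this
      simpa [PySem.List.bisectLeftLoop] using ⟨by omega, hlow, hhigh⟩
  | succ fuel ih =>
      intro lo hi hlohi hhi hfuel hlow hhigh
      by_cases hlt : lo < hi
      · have hmid : (lo + hi) / 2 < xs.length := by omega
        have hsome : xs[(lo + hi) / 2]? = some xs[(lo + hi) / 2] := List.getElem?_eq_getElem hmid
        have hred : PySem.List.bisectLeftLoop xs x (fuel + 1) lo hi
            = if xs[(lo + hi) / 2] < x then
                PySem.List.bisectLeftLoop xs x fuel ((lo + hi) / 2 + 1) hi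
              else PySem.List.bisectLeftLoop xs x fuel lo ((lo + hi) / 2) := by
          rw [show PySem.List.bisectLeftLoop xs x (fuel + 1) lo hi
              = (if lo < hi then
                  (match xs[(lo + hi) / 2]? with
                   | some y => if y < x then PySem.List.bisectLeftLoop xs x fuel ((lo + hi) / 2 + 1) hi
                               else PySem.List.bisectLeftLoop xs x fuel lo ((lo + hi) / 2)
                   | none => lo)
                 else lo) from rfl, if_pos hlt, hsome]
        rw [hred]
        by_cases hy : xs[(lo + hi) / 2] < x
        · rw [if_pos hy]
          refine ih ((lo + hi) / 2 + 1) hi (by omega) hhi (by omega) ?_ hhigh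
          intro j hj hjlt
          rcases Nat.lt_or_ge j ((lo + hi) / 2) with hj2 | hj2
          · exact lt_of_le_of_lt (List.pairwise_iff_getElem.mp hs j ((lo + hi) / 2) hj hmid hj2) hy
          · have : j = (lo + hi) / 2 := by omega
            subst this; exact hy
        · rw [if_neg hy]
          refine ih lo ((lo + hi) / 2) (by omega) (by omega) (by omega) hlow ?_
          intro j hj hj2
          have hx : x ≤ xs[(lo + hi) / 2] := le_of_not_gt hy
          rcases Nat.lt_or_ge ((lo + hi) / 2) j with hj3 | hj3
          · exact le_trans hx (List.pairwise_iff_getElem.mp hs ((lo + hi) / 2) j hmid hj hj3)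
          · have : j = (lo + hi) / 2 := by omega
            subst this; exact hx
      · have : lo = hi := by omega
        subst this
        simpa [PySem.List.bisectLeftLoop] using ⟨by omega, hlow, hhigh⟩

theorem pvBisectRightLoop_spec {α : Type} [LinearOrder α] (xs : List α) (x : α)
    (hs : xs.Pairwise (· ≤ ·)) :
    ∀ (fuel lo hi : Nat), lo ≤ hi → hi ≤ xs.length → hi - lo ≤ fuel →
      (∀ j (hj : j < xs.length), j < lo → xs[j] ≤ x) →
      (∀ j (hj : j < xs.length), hi ≤ j → x < xs[j]) →
      PySem.List.bisectRightLoop xs x fuel lo hi ≤ xs.length ∧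
      (∀ j (hj : j < xs.length), j < PySem.List.bisectRightLoop xs x fuel lo hi → xs[j] ≤ x) ∧
      (∀ j (hj : j < xs.length), PySem.List.bisectRightLoop xs x fuel lo hi ≤ j → x < xs[j]) := by
  intro fuel
  induction fuel with
  | zero =>
      intro lo hi hlohi hhi hfuel hlow hhigh
      have : lo = hi := by omega
      subst this
      simpa [PySem.List.bisectRightLoop] using ⟨by omega, hlow, hhigh⟩
  | succ fuel ih =>
      intro lo hi hlohi hhi hfuel hlow hhigh
      by_cases hlt : lo < hi
      · have hmid : (lo + hi) / 2 < xs.length := by omega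
        have hsome : xs[(lo + hi) / 2]? = some xs[(lo + hi) / 2] := List.getElem?_eq_getElem hmid
        have hred : PySem.List.bisectRightLoop xs x (fuel + 1) lo hi
            = if x < xs[(lo + hi) / 2] then
                PySem.List.bisectRightLoop xs x fuel lo ((lo + hi) / 2)
              else PySem.List.bisectRightLoop xs x fuel ((lo + hi) / 2 + 1) hi := by
          rw [show PySem.List.bisectRightLoop xs x (fuel + 1) lo hi
              = (if lo < hi then
                  (match xs[(lo + hi) / 2]? with
                   | some y => if x < y then PySem.List.bisectRightLoop xs x fuel lo ((lo + hi) / 2)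
                               else PySem.List.bisectRightLoop xs x fuel ((lo + hi) / 2 + 1) hi
                   | none => lo)
                 else lo) from rfl, if_pos hlt, hsome]
        rw [hred]
        by_cases hy : x < xs[(lo + hi) / 2]
        · rw [if_pos hy]
          refine ih lo ((lo + hi) / 2) (by omega) (by omega) (by omega) hlow ?_
          intro j hj hj2
          rcases Nat.lt_or_ge ((lo + hi) / 2) j with hj3 | hj3
          · exact lt_of_lt_of_le hy (List.pairwise_iff_getElem.mp hs ((lo + hi) / 2) j hmid hj hj3)
          · have : j = (lo + hi) / 2 := by omega
            subst this; exact hy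
        · rw [if_neg hy]
          refine ih ((lo + hi) / 2 + 1) hi (by omega) hhi (by omega) ?_ hhigh
          intro j hj hjlt
          have hx : xs[(lo + hi) / 2] ≤ x := le_of_not_gt hy
          rcases Nat.lt_or_ge j ((lo + hi) / 2) with hj2 | hj2
          · exact le_trans (List.pairwise_iff_getElem.mp hs j ((lo + hi) / 2) hj hmid hj2) hx
          · have : j = (lo + hi) / 2 := by omega
            subst this; exact hx
      · have : lo = hi := by omega
        subst this
        simpa [PySem.List.bisectRightLoop] using ⟨by omega, hlow, hhigh⟩

theorem pvBisectLeft_countP {α : Type} [LinearOrder α] (xs : List α) (x : α)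
    (hs : xs.Pairwise (· ≤ ·)) :
    PySem.List.bisectLeft xs x = xs.countP (fun y => decide (y < x)) := by
  obtain ⟨hle, h1, h2⟩ := pvBisectLeftLoop_spec xs x hs xs.length 0 xs.length
    (Nat.zero_le _) le_rfl (by omega) (by omega) (by omega)
  exact (pvCountP_of_split _ xs _ hle (fun j hj hjr => by simpa using h1 j hj hjr)
    (fun j hj hjr => by simpa using h2 j hj hjr)).symm

theorem pvBisectRight_countP {α : Type} [LinearOrder α] (xs : List α) (x : α)
    (hs : xs.Pairwise (· ≤ ·)) :
    PySem.List.bisectRight xs x = xs.countP (fun y => decide (y ≤ x)) := by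
  obtain ⟨hle, h1, h2⟩ := pvBisectRightLoop_spec xs x hs xs.length 0 xs.length
    (Nat.zero_le _) le_rfl (by omega) (by omega) (by omega)
  exact (pvCountP_of_split _ xs _ hle (fun j hj hjr => by simpa using h1 j hj hjr)
    (fun j hj hjr => by simpa [not_le] using h2 j hj hjr)).symm

-- the bucket fold: slot n collects g w for the words with k w = n, in order
theorem pvFold_length {α β : Type} (k : α → Nat) (g : α → β) :
    ∀ (ws : List α) (a : List (List β)),
      (ws.foldl (fun acc w => acc.modify (k w) (· ++ [g w])) a).length = a.length
  | [], a => rfl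
  | w :: ws, a => by
      rw [List.foldl_cons, pvFold_length k g ws]
      simp

theorem pvFold_get {α β : Type} (k : α → Nat) (g : α → β) :
    ∀ (ws : List α) (a : List (List β)) (n : Nat),
      (ws.foldl (fun acc w => acc.modify (k w) (· ++ [g w])) a)[n]?
        = (a[n]?).map (· ++ (ws.filter (fun w => k w == n)).map g)
  | [], a, n => by cases h : a[n]? <;> simp [h]
  | w :: ws, a, n => by
      rw [List.foldl_cons, pvFold_get k g ws]
      rw [List.getElem?_modify]
      by_cases hk : k w = n
      · subst hk
        cases h : a[(k w)]? <;> simp [h, List.filter_cons]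
      · cases h : a[n]? <;> simp [h, List.filter_cons, hk]

theorem pvCountSplit {α β : Type} [LinearOrder α] (P : β → Bool) (f : β → α)
    (lo hi : α) (h : lo ≤ hi) :
    ∀ l : List β,
      l.countP (fun w => P w && decide (f w ≤ hi))
        = l.countP (fun w => P w && decide (f w < lo))
          + l.countP (fun w => P w && (decide (lo ≤ f w) && decide (f w ≤ hi)))
  | [] => rfl
  | a :: l => by
      have ih := pvCountSplit P f lo hi h l
      by_cases h1 : P a = true
      · by_cases h2 : f a ≤ hi
        · by_cases h3 : f a < lo
          · have h4 : ¬ lo ≤ f a := not_le.mpr h3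
            simp [List.countP_cons, h1, h2, h3, h4]
            omega
          · have h4 : lo ≤ f a := not_lt.mp h3
            simp [List.countP_cons, h1, h2, h3, h4]
            omega
        · have h3 : ¬ f a < lo := fun hh => h2 (le_of_lt (lt_of_lt_of_le hh h))
          simp [List.countP_cons, h1, h2, h3]
          omega
      · simp [List.countP_cons, h1]
        omega

-- q[0] and q.startswith('?') on a nonempty query
theorem pvHead (q : String) (c : Char) (t : List Char) (h : q.toList = c :: t) :
    (PySem.Str.pyGet? q 0).getD '?' = c := by
  have h0 := PySem.Str.pyGet?_natCast q 0
  simp only [Nat.cast_zero] at h0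
  rw [h0, h]
  rfl

theorem pvStarts (q : String) (c : Char) (t : List Char) (h : q.toList = c :: t) :
    PySem.Str.startswith q "?" = (c == '?') := by
  rw [PySem.Str.startswith_eq]
  have h1 : ("?" : String).toList = ['?'] := rfl
  rw [h1, h]
  simp [PySem.Chars.startswith, List.isPrefixOf]
  by_cases hc : c = '?' <;> simp [hc]
  exact fun hh => hc hh.symm

-- the per-branch count: A's bucket + sort + bisect equals B's direct count
theorem pvBranchCount (words : List String)
    (g : String → String) (p : String) (n : Nat) (hn : n ≤ 10000) :
    pvCountByRange
      (PySem.List.pyGetD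
        ((words.foldl (fun a w => a.modify (PySem.Str.len w).toNat (· ++ [g w]))
            (List.replicate 10001 [])).map (fun b => PySem.List.sorted b (fun x => x) false))
        (n : Int) [])
      (PySem.Str.replace p "?" "a") (PySem.Str.replace p "?" "z")
    = ((words.countP (fun w => (w.toList.length == n)
          && (decide (PySem.Str.replace p "?" "a" ≤ g w)
              && decide (g w ≤ PySem.Str.replace p "?" "z")))) : Int) := by
  set lo := PySem.Str.replace p "?" "a" with hlo
  set hi := PySem.Str.replace p "?" "z" with hhi
  have hlohi : lo ≤ hi := pvReplace_le p
  set M := (words.filter (fun w => (PySem.Str.len w).toNat == n)).map g with hM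
  -- the indexed slot is sorted M
  have hslot : PySem.List.pyGetD
      ((words.foldl (fun a w => a.modify (PySem.Str.len w).toNat (· ++ [g w]))
          (List.replicate 10001 [])).map (fun b => PySem.List.sorted b (fun x => x) false))
      (n : Int) [] = PySem.List.sorted M (fun x => x) false := by
    rw [PySem.List.pyGetD_natCast, List.getD_eq_getElem?_getD, List.getElem?_map,
      pvFold_get, List.getElem?_replicate, if_pos (by omega : n < 10001)]
    simp [hM]
  rw [hslot]
  have hsorted : (PySem.List.sorted M (fun x => x) false).Pairwise (· ≤ ·) := by
    simpa using PySem.List.sorted_pairwise M (fun x => x)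
  have hperm : (PySem.List.sorted M (fun x => x) false).Perm M :=
    PySem.List.sorted_perm M (fun x => x) false
  unfold pvCountByRange
  rw [pvBisectLeft_countP _ _ hsorted, pvBisectRight_countP _ _ hsorted,
    hperm.countP_eq, hperm.countP_eq, hM, List.countP_map, List.countP_map,
    List.countP_filter, List.countP_filter]
  have e1 : words.countP (fun a => ((fun y => decide (y ≤ hi)) ∘ g) a
        && ((PySem.Str.len a).toNat == n))
      = words.countP (fun w => (w.toList.length == n) && decide (g w ≤ hi)) :=
    List.countP_congr (fun x _ => by
      simp only [Function.comp, Bool.and_eq_true, PySem.Str.len_eq, Int.toNat_natCast]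
      exact and_comm)
  have e2 : words.countP (fun a => ((fun y => decide (y < lo)) ∘ g) a
        && ((PySem.Str.len a).toNat == n))
      = words.countP (fun w => (w.toList.length == n) && decide (g w < lo)) :=
    List.countP_congr (fun x _ => by
      simp only [Function.comp, Bool.and_eq_true, PySem.Str.len_eq, Int.toNat_natCast]
      exact and_comm)
  rw [e1, e2, pvCountSplit (fun w => (w.toList.length == n)) g lo hi hlohi words]
  push_cast
  ring

-- per-query equality
theorem pvQuery (words : List String)
    (q : String) (hq0 : q.toList.length ≠ 0) (hq1 : q.toList.length ≤ 10000) :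
    pvACount words q = pvAltCount words q := by
  obtain ⟨c, t, hct⟩ : ∃ c t, q.toList = c :: t := by
    cases h : q.toList with
    | nil => exact absurd (by simp [h]) hq0
    | cons c t => exact ⟨c, t, rfl⟩
  have hA : pvACount words q =
      if c ≠ '?' then
        pvCountByRange (PySem.List.pyGetD
          ((words.foldl (fun a w => a.modify (PySem.Str.len w).toNat (· ++ [w]))
              (List.replicate 10001 [])).map (fun b => PySem.List.sorted b (fun x => x) false))
          (PySem.Str.len q) [])
          (PySem.Str.replace q "?" "a") (PySem.Str.replace q "?" "z")
      else
        pvCountByRange (PySem.List.pyGetD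
          ((words.foldl (fun a w => a.modify (PySem.Str.len w).toNat (· ++ [pvRev w]))
              (List.replicate 10001 [])).map (fun b => PySem.List.sorted b (fun x => x) false))
          (PySem.Str.len q) [])
          (PySem.Str.replace (pvRev q) "?" "a") (PySem.Str.replace (pvRev q) "?" "z") := by
    simp only [pvACount]
    rw [PySem.List.foldl_prod_mk
      (f := fun (a : List (List String)) (w : String) =>
        a.modify (PySem.Str.len w).toNat (· ++ [w]))
      (g := fun (a : List (List String)) (w : String) =>
        a.modify (PySem.Str.len w).toNat (· ++ [pvRev w])),
      pvHead q c t hct]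
  have hB : pvAltCount words q =
      if c ≠ '?' then
        ((words.countP (fun w => PySem.Str.len w == PySem.Str.len q
            && decide (PySem.Str.replace q "?" "a" ≤ w)
            && decide (w ≤ PySem.Str.replace q "?" "z")) : Nat) : Int)
      else
        ((words.countP (fun w => PySem.Str.len w == PySem.Str.len q
            && decide (PySem.Str.replace (pvRev q) "?" "a" ≤ pvRev w)
            && decide (pvRev w ≤ PySem.Str.replace (pvRev q) "?" "z")) : Nat) : Int) := by
    unfold pvAltCount
    rw [pvStarts q c t hct]
    by_cases hc : c = '?' <;> simp [hc]
  rw [hA, hB]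
  have hlen : PySem.Str.len q = ((q.toList.length : Nat) : Int) := PySem.Str.len_eq q
  by_cases hc : c = '?'
  · rw [if_neg (by simpa using hc), if_neg (by simpa using hc), hlen]
    refine (pvBranchCount words pvRev (pvRev q) q.toList.length hq1).trans ?_
    congr 1
    refine List.countP_congr (fun x _ => ?_)
    simp only [Bool.and_eq_true, PySem.Str.len_eq, beq_iff_eq, Nat.cast_inj, decide_eq_true_eq]
    exact and_assoc.symm
  · rw [if_pos hc, if_pos hc, hlen]
    refine (pvBranchCount words (fun s => s) q q.toList.length hq1).trans ?_
    congr 1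
    refine List.countP_congr (fun x _ => ?_)
    simp only [Bool.and_eq_true, PySem.Str.len_eq, beq_iff_eq, Nat.cast_inj, decide_eq_true_eq]
    exact and_assoc.symm

-- ===== VERDICT (by name: the statement is the Claim_ definition above) =====
theorem song_search_ans_spec : Claim_equal_song_search_ans := by
  intro words queries _ hpre
  unfold Spec_song_search_ans song_search_ans_alt
  rw [pvA_eq_map]
  exact List.map_congr_left (fun q hq =>
    pvQuery words q (hpre.2 q hq).1 (hpre.2 q hq).2)
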